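-- pv_equiv track=rewrite | github.com/Mazars-Tech/AD_Miner | ad_miner/sources/modules/common_analysis.py | parseConstrainedData
-- ===== SOURCE A (Python) =====
-- def parseConstrainedData(list_of_dict):
--     final_dict = {}
--     for dict in list_of_dict:
--         if dict["name"] in final_dict.keys():
--             final_dict[dict["name"]] += [dict["computer"]]
--         else:
--             final_dict[dict["name"]] = [dict["computer"]]
--     return final_dict
-- ===== SOURCE B (Python) =====
-- def parseConstrainedData(list_of_dict):
--     names = dict.fromkeys(d["name"] for d in list_of_dict)
--     return {n: [d["computer"] for d in list_of_dict if d["name"] == n] for n in names}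
-- ===== Notes on version B (the rewrite author's own statement) =====
-- stated objective: simpler
-- what changed: Replaces A's stateful accumulate-into-dict loop with two declarative passes: an ordered dedup of the names (dict.fromkeys) and a per-name comprehension collecting the computers.
import Mathlib
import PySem

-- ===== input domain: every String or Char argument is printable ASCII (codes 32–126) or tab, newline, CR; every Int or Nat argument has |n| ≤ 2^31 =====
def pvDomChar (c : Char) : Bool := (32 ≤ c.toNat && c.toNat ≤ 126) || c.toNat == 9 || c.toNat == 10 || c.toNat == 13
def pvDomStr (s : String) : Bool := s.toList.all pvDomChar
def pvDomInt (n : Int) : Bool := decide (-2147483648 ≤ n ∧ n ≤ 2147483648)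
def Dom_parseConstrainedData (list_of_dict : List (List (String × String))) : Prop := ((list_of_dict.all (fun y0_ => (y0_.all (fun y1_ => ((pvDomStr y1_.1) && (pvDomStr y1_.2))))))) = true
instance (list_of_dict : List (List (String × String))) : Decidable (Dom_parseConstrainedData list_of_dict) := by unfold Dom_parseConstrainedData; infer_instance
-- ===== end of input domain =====

-- B replaces A's accumulate-into-dict loop by an ordered dedup of names plus a per-name comprehension (simpler decomposition, same result).


-- ===== PORT A =====
-- d["k"] on an inner dict (given as an association list, later binding wins as in dict(pairs));
-- total form via getD "" — Pre_ guarantees the key is present, exactly where Python would not raise KeyError.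
def pvLook (d : List (String × String)) (k : String) : String :=
  ((PySem.Dict.ofList d).get? k).getD ""

def parseConstrainedData (list_of_dict : List (List (String × String))) : List (String × List String) :=
  (list_of_dict.foldl
    (fun final_dict d =>
      let n := pvLook d "name"
      let c := pvLook d "computer"
      if final_dict.contains n then
        final_dict.insert n (final_dict.getD n [] ++ [c])
      else
        final_dict.insert n [c])
    (PySem.Dict.empty : PySem.Dict String (List String))).items

-- ===== PORT B =====
def parseConstrainedData_alt (list_of_dict : List (List (String × String))) : List (String × List String) :=
  let names := PySem.List.dedup (list_of_dict.map (fun d => pvLook d "name"))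
  names.map (fun n =>
    (n, (list_of_dict.filter (fun d => pvLook d "name" == n)).map
          (fun d => pvLook d "computer")))

-- ===== PRECONDITION & SPEC =====
-- Pre_ excludes exactly the inputs where Python A raises KeyError: some inner dict lacks "name" or "computer".
def Pre_parseConstrainedData (list_of_dict : List (List (String × String))) : Prop :=
  ∀ d ∈ list_of_dict, (PySem.Dict.ofList d).contains "name" = true ∧ (PySem.Dict.ofList d).contains "computer" = true
instance (list_of_dict : List (List (String × String))) : Decidable (Pre_parseConstrainedData list_of_dict) := by unfold Pre_parseConstrainedData; infer_instance
def pvWitness_parseConstrainedData : (List (List (String × String))) :=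
  [[("name", "alice"), ("computer", "PC1")], [("name", "bob"), ("computer", "PC2")], [("name", "alice"), ("computer", "PC3")]]

def Spec_parseConstrainedData (list_of_dict : List (List (String × String))) (out : List (String × List String)) : Prop := out = parseConstrainedData_alt list_of_dict
instance (list_of_dict : List (List (String × String))) (out : List (String × List String)) : Decidable (Spec_parseConstrainedData list_of_dict out) := by unfold Spec_parseConstrainedData; infer_instance

-- ===== CLAIM (what is proved, stated in full; the proofs are below) =====
def Claim_equal_parseConstrainedData : Prop := ∀ (list_of_dict : List (List (String × String))), Dom_parseConstrainedData list_of_dict → Pre_parseConstrainedData list_of_dict → Spec_parseConstrainedData list_of_dict (parseConstrainedData list_of_dict)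

-- ===== LEMMAS AND PROOFS =====

-- A's if/else step IS Dict.modify with default []: in the absent branch getD gives [].
lemma pvStep_eq_modify (fd : PySem.Dict String (List String)) (d : List (String × String)) :
    (if fd.contains (pvLook d "name") then
        fd.insert (pvLook d "name") (fd.getD (pvLook d "name") [] ++ [pvLook d "computer"])
      else
        fd.insert (pvLook d "name") [pvLook d "computer"]) =
    fd.modify (pvLook d "name") [] (fun v => v ++ [pvLook d "computer"]) := by
  by_cases h : fd.contains (pvLook d "name")
  · simp [h, PySem.Dict.modify]
  · simp only [Bool.not_eq_true] at h
    simp [h, PySem.Dict.modify, PySem.Dict.getD_of_not_contains fd [] h]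

-- The whole of A's loop, as a fold of modify over the (name, computer) pairs.
lemma pvA_eq_pairs_fold (l : List (List (String × String))) :
    parseConstrainedData l =
    ((l.map (fun d => (pvLook d "name", pvLook d "computer"))).foldl
      (fun fd p => fd.modify p.1 [] (fun v => v ++ [p.2]))
      (PySem.Dict.empty : PySem.Dict String (List String))).items := by
  unfold parseConstrainedData
  rw [List.foldl_map]
  exact congrArg PySem.Dict.items
    (List.foldl_ext _ _ _ (fun fd d _ => pvStep_eq_modify fd d))

theorem parseConstrainedData_spec_aux (l : List (List (String × String))) :
    parseConstrainedData l = parseConstrainedData_alt l := by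
  rw [pvA_eq_pairs_fold]
  set l' := l.map (fun d => (pvLook d "name", pvLook d "computer")) with hl'
  set D := l'.foldl (fun fd p => fd.modify p.1 [] (fun v => v ++ [p.2]))
            (PySem.Dict.empty : PySem.Dict String (List String)) with hD
  have hnd : D.keys.Nodup := by
    rw [hD]
    exact PySem.Dict.nodup_keys_foldl_modify_key l' (fun p => p.1) []
      (fun _ p v => v ++ [p.2]) PySem.Dict.empty (by simp)
  have hkeys : D.keys = PySem.Set.ofList (l.map (fun d => pvLook d "name")) := by
    rw [hD]
    rw [PySem.Dict.keys_foldl_modify_key l' (fun p => p.1) []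
      (fun _ p v => v ++ [p.2]) PySem.Dict.empty]
    simp [hl', PySem.Set.update, PySem.Set.ofList_eq_foldl, List.map_map, Function.comp_def]
  have hget : ∀ c, D.getD c [] = (l'.filter (fun p => p.1 == c)).map (fun p => p.2) := by
    intro c
    rw [hD, PySem.Dict.getD_foldl_modify_append]
    simp
  rw [PySem.Dict.items_eq_map_keys D hnd [], hkeys]
  unfold parseConstrainedData_alt
  rw [PySem.List.dedup_eq_ofList]
  apply List.map_congr_left
  intro n _
  rw [hget n]
  simp [hl', List.filter_map, Function.comp_def]

-- ===== VERDICT (by name: the statement is the Claim_ definition above) =====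
theorem parseConstrainedData_spec : Claim_equal_parseConstrainedData := by
  intro l _ _
  exact parseConstrainedData_spec_aux l
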